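-- pv_equiv track=rewrite | github.com/LonFrench/PuzzlePy | main.py | resolve_singulars
-- ===== SOURCE A (Python) =====
-- alpha_list = ['C', 'D', 'E', 'F', 'L', 'O', 'P', 'T', 'Z']
--
-- def resolve_singulars(context, line_index, line):
--     change_made = False
--     search_str = ""
--     for cell in line:
--         if len(cell) > 1:
--             search_str += cell
--
--     #  Make list of chars that occur only once
--     singular_chars = []
--     for char in alpha_list:
--         if search_str.count(char) == 1:
--             singular_chars.append(char)
--
--     for char in singular_chars:
--         for cell in range(len(line)):
--             if len(line[cell]) > 1:
--                 if line[cell].find(char) != -1: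
--                     line[cell] = char
--                     change_made =  True
--                     break
--
--     return change_made
-- ===== SOURCE B (Python) =====
-- alpha_list = ['C', 'D', 'E', 'F', 'L', 'O', 'P', 'T', 'Z']
--
-- def resolve_singulars(context, line_index, line):
--     # Streaming seen-once / seen-more two-set pass over the chars of the
--     # multi-char cells (no counting), then one pass over the cells replacing
--     # each multi-char cell by the alphabet char of minimal index among its
--     # singular chars.
--     seen_once, seen_more = set(), set()
--     for cell in line:
--         if len(cell) > 1:
--             for ch in cell:
--                 if ch in seen_more:
--                     continue
--                 if ch in seen_once:
--                     seen_once.discard(ch)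
--                     seen_more.add(ch)
--                 else:
--                     seen_once.add(ch)
--     changed = False
--     for i, cell in enumerate(line):
--         if len(cell) > 1:
--             idxs = [alpha_list.index(c) for c in cell if c in seen_once and c in alpha_list]
--             if idxs:
--                 line[i] = alpha_list[min(idxs)]
--                 changed = True
--     return changed
-- ===== Notes on version B (the rewrite author's own statement) =====
-- stated objective: alternative
-- what changed: A counts each of the 9 alphabet chars over the concatenated multi-char cells (9 str.count scans) and then rescans the whole line once per singular char with a break loop; B never counts: it streams the chars of the multi-char cells once through a seen-once/seen-more pair of sets, then in a single cell pass replaces each multi-char cell by the alphabet char of minimal index among its singular chars (same in-place mutation of line, same return value).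
import Mathlib
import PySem

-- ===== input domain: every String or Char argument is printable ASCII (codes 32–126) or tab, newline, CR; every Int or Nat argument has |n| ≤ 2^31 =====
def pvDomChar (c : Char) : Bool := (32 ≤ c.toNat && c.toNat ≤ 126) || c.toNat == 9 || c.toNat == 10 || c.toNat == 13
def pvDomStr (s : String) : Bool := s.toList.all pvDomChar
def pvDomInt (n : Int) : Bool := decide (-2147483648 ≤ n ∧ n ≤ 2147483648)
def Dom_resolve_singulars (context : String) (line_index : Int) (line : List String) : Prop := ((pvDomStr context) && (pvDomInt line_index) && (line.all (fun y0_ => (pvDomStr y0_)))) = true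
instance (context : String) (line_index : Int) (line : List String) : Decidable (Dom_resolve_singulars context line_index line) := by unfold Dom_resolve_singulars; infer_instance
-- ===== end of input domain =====

-- B replaces A's counting passes (9 str.count scans plus one line rescan with a
-- break loop per singular char) by a streaming seen-once/seen-more two-set pass
-- over the chars of the multi-char cells and one cell pass picking the minimal
-- alphabet index; in Python both A and B mutate `line` identically, and the
-- theorem below is about the return value.

-- ===== PORT A =====
def pvAlphaA : List String := ["C", "D", "E", "F", "L", "O", "P", "T", "Z"]

-- A's inner 'for cell in range(len(line)): … break' loop, for one char
def pvInnerA (c : String) : List String → List String × Bool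
  | [] => ([], false)
  | cell :: rest =>
    if PySem.Str.len cell > 1 then
      if PySem.Str.find cell c ≠ -1 then (c :: rest, true)
      else
        let r := pvInnerA c rest
        (cell :: r.1, r.2)
    else
      let r := pvInnerA c rest
      (cell :: r.1, r.2)

def resolve_singulars (context : String) (line_index : Int) (line : List String) : Bool :=
  let search_str := line.foldl (fun s cell => if PySem.Str.len cell > 1 then s ++ cell else s) ""
  let singular_chars := pvAlphaA.foldl
    (fun acc ch => if PySem.Str.count search_str ch == 1 then acc ++ [ch] else acc) ([] : List String)
  let st := singular_chars.foldl
    (fun (st : List String × Bool) ch =>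
      let r := pvInnerA ch st.1
      (r.1, st.2 || r.2)) (line, false)
  st.2

-- ===== PORT B =====
def pvAlphaB : List Char := ['C', 'D', 'E', 'F', 'L', 'O', 'P', 'T', 'Z']

-- B's per-char step of the streaming seen-once/seen-more pass
def pvStepB (s : PySem.Set Char × PySem.Set Char) (ch : Char) : PySem.Set Char × PySem.Set Char :=
  if PySem.Set.contains s.2 ch then s
  else if PySem.Set.contains s.1 ch then (PySem.Set.discard s.1 ch, PySem.Set.add s.2 ch)
  else (PySem.Set.add s.1 ch, s.2)

def resolve_singulars_alt (context : String) (line_index : Int) (line : List String) : Bool :=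
  let sets := line.foldl
    (fun (s : PySem.Set Char × PySem.Set Char) cell =>
      if PySem.Str.len cell > 1 then cell.toList.foldl pvStepB s else s)
    (PySem.Set.empty, PySem.Set.empty)
  let seen_once := sets.1
  let st := line.foldl
    (fun (st : List String × Bool) cell =>
      if PySem.Str.len cell > 1 then
        let idxs : List Nat := cell.toList.filterMap (fun c =>
          if PySem.Set.contains seen_once c && pvAlphaB.contains c
          then PySem.List.index? pvAlphaB c else none)
        match PySem.List.min? idxs (fun x => x) with
        | some m =>
          (st.1 ++ [match PySem.List.pyGet? pvAlphaB (m : Int) with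
                    | some c => String.ofList [c]
                    | none => cell], true)
        | none => (st.1 ++ [cell], st.2)
      else (st.1 ++ [cell], st.2)) (([] : List String), false)
  st.2

-- ===== PRECONDITION & SPEC =====
def Spec_resolve_singulars (context : String) (line_index : Int) (line : List String) (out : Bool) : Prop := out = resolve_singulars_alt context line_index line
instance (context : String) (line_index : Int) (line : List String) (out : Bool) : Decidable (Spec_resolve_singulars context line_index line out) := by unfold Spec_resolve_singulars; infer_instance

-- ===== CLAIM (what is proved, stated in full; the proofs are below) =====
def Claim_equal_resolve_singulars : Prop := ∀ (context : String) (line_index : Int) (line : List String), Dom_resolve_singulars context line_index line → Spec_resolve_singulars context line_index line (resolve_singulars context line_index line)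

-- ===== LEMMAS AND PROOFS =====

theorem pvInnerA2 (ch : String) (l : List String) :
    ((pvInnerA ch l).2 = true) ↔ ∃ cell ∈ l, 1 < cell.length ∧ ch.toList <:+: cell.toList := by
  induction l with
  | nil => simp [pvInnerA]
  | cons hd t ih =>
    by_cases h1 : 1 < hd.length
    · by_cases h2 : ch.toList <:+: hd.toList
      · simp [pvInnerA, h1, PySem.Chars.find_eq_neg_one_iff, h2]
      · simp [pvInnerA, h1, PySem.Chars.find_eq_neg_one_iff, h2, ih]
    · simp [pvInnerA, h1, ih]

def pvOcc (line : List String) (c : Char) : Nat :=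
  ((line.filter (fun cell => 1 < cell.length)).flatMap String.toList).count c

theorem pvSearchStr (line : List String) (s0 : String) :
    (line.foldl (fun s cell => if PySem.Str.len cell > 1 then s ++ cell else s) s0).toList
      = s0.toList ++ (line.filter (fun cell => 1 < cell.length)).flatMap String.toList := by
  induction line generalizing s0 with
  | nil => simp
  | cons hd t ih =>
    have hiff : (PySem.Str.len hd > 1) ↔ (1 < hd.length) := by
      simp [PySem.Str.len_eq]
    by_cases h : 1 < hd.length
    · simp only [List.foldl_cons]
      rw [if_pos (hiff.2 h), ih]
      simp [h]
    · simp only [List.foldl_cons]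
      rw [if_neg (fun hh => h (hiff.1 hh)), ih]
      simp [h]

theorem pvCountGoSingleton (c : Char) : ∀ (fuel : Nat) (l : List Char) (acc : Nat),
    l.length ≤ fuel → PySem.Chars.count.go [c] fuel l acc = acc + l.count c := by
  intro fuel
  induction fuel with
  | zero => intro l acc h; cases l with
    | nil => simp [PySem.Chars.count.go]
    | cons h t => simp at h
  | succ n ih =>
    intro l acc h
    cases l with
    | nil => simp [PySem.Chars.count.go]
    | cons hd t =>
      simp only [PySem.Chars.count.go]
      by_cases hc : c = hd
      · subst hc
        simp [List.isPrefixOf, ih t (acc + 1) (by simpa using h)]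
        omega
      · have hp : [c].isPrefixOf (hd :: t) = false := by
          simp [List.isPrefixOf]
          exact fun h' => (hc h').elim
        simp [hp, ih t acc (by simpa using h), Ne.symm hc]

theorem pvCountSingleton (s : List Char) (c : Char) :
    PySem.Chars.count s [c] = s.count c := by
  simp [PySem.Chars.count, pvCountGoSingleton c s.length s 0 le_rfl]

theorem pvMono (cs : List String) : ∀ (st : List String × Bool), st.2 = true →
    (cs.foldl (fun (st : List String × Bool) ch => let r := pvInnerA ch st.1; (r.1, st.2 || r.2)) st).2 = true := by
  induction cs with
  | nil => intro st h; simpa using h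
  | cons hd t ih => intro st h; exact ih _ (by simp [h])

theorem pvInfixSingleton (c : Char) (l : List Char) : [c] <:+: l ↔ c ∈ l := by
  constructor
  · intro h; exact List.singleton_sublist.1 h.sublist
  · intro h
    obtain ⟨s, t, rfl⟩ := List.append_of_mem h
    exact ⟨s, t, by simp⟩

theorem pvOccMem (line : List String) (c : Char) (h : pvOcc line c = 1) :
    ∃ cell ∈ line, 1 < cell.length ∧ c ∈ cell.toList := by
  have hm : c ∈ (line.filter (fun cell => 1 < cell.length)).flatMap String.toList := by
    have : 0 < pvOcc line c := by omega
    exact List.count_pos_iff.mp (by simpa [pvOcc] using this)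
  obtain ⟨cell, hcell, hc⟩ := List.mem_flatMap.mp hm
  exact ⟨cell, (List.mem_filter.mp hcell).1, by simpa using (List.mem_filter.mp hcell).2, hc⟩

theorem pvCondIff (line : List String) (ch : String) (c : Char) (hch : ch.toList = [c]) :
    ((PySem.Str.count (line.foldl (fun s cell => if PySem.Str.len cell > 1 then s ++ cell else s) "") ch == 1) = true)
      ↔ pvOcc line c = 1 := by
  rw [PySem.Str.count_eq, hch, pvSearchStr, pvCountSingleton]
  simp [pvOcc]

theorem pvAtoB : ∀ ch ∈ pvAlphaA, ∃ c ∈ pvAlphaB, ch.toList = [c] := by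
  intro ch h
  fin_cases h
  · exact ⟨'C', by simp [pvAlphaB], rfl⟩
  · exact ⟨'D', by simp [pvAlphaB], rfl⟩
  · exact ⟨'E', by simp [pvAlphaB], rfl⟩
  · exact ⟨'F', by simp [pvAlphaB], rfl⟩
  · exact ⟨'L', by simp [pvAlphaB], rfl⟩
  · exact ⟨'O', by simp [pvAlphaB], rfl⟩
  · exact ⟨'P', by simp [pvAlphaB], rfl⟩
  · exact ⟨'T', by simp [pvAlphaB], rfl⟩
  · exact ⟨'Z', by simp [pvAlphaB], rfl⟩

theorem pvBtoA : ∀ c ∈ pvAlphaB, ∃ ch ∈ pvAlphaA, ch.toList = [c] := by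
  intro c h
  fin_cases h
  · exact ⟨"C", by simp [pvAlphaA], rfl⟩
  · exact ⟨"D", by simp [pvAlphaA], rfl⟩
  · exact ⟨"E", by simp [pvAlphaA], rfl⟩
  · exact ⟨"F", by simp [pvAlphaA], rfl⟩
  · exact ⟨"L", by simp [pvAlphaA], rfl⟩
  · exact ⟨"O", by simp [pvAlphaA], rfl⟩
  · exact ⟨"P", by simp [pvAlphaA], rfl⟩
  · exact ⟨"T", by simp [pvAlphaA], rfl⟩
  · exact ⟨"Z", by simp [pvAlphaA], rfl⟩

theorem pvACharacter (context : String) (line_index : Int) (line : List String) :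
    resolve_singulars context line_index line = true ↔ ∃ c ∈ pvAlphaB, pvOcc line c = 1 := by
  simp only [resolve_singulars]
  rw [PySem.List.foldl_append_if (p := fun ch => PySem.Str.count (line.foldl (fun s cell => if PySem.Str.len cell > 1 then s ++ cell else s) "") ch == 1) (f := fun ch => ch)]
  simp only [List.nil_append, List.map_id']
  cases hL : List.filter (fun ch => PySem.Str.count (line.foldl (fun s cell => if PySem.Str.len cell > 1 then s ++ cell else s) "") ch == 1) pvAlphaA with
  | nil =>
    simp only [List.foldl_nil]
    constructor
    · intro h; exact absurd h (by simp)
    · rintro ⟨c, hc, hocc⟩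
      obtain ⟨ch, hchA, hchtl⟩ := pvBtoA c hc
      have hnone := List.filter_eq_nil_iff.mp hL ch hchA
      exact absurd ((pvCondIff line ch c hchtl).2 hocc) (by simpa using hnone)
  | cons ch0 rest =>
    have hmem : ch0 ∈ List.filter (fun ch => PySem.Str.count (line.foldl (fun s cell => if PySem.Str.len cell > 1 then s ++ cell else s) "") ch == 1) pvAlphaA := by
      rw [hL]; exact List.mem_cons_self
    have hcond := (List.mem_filter.mp hmem).2
    obtain ⟨c, hcB, hchtl⟩ := pvAtoB ch0 (List.mem_filter.mp hmem).1
    have hocc : pvOcc line c = 1 := (pvCondIff line ch0 c hchtl).1 hcond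
    simp only [List.foldl_cons]
    have hr2 : (pvInnerA ch0 line).2 = true := by
      obtain ⟨cell, hcl, hlen, hmemc⟩ := pvOccMem line c hocc
      exact (pvInnerA2 ch0 line).2 ⟨cell, hcl, hlen, by rw [hchtl]; exact (pvInfixSingleton c cell.toList).2 hmemc⟩
    constructor
    · intro _; exact ⟨c, hcB, hocc⟩
    · intro _
      exact pvMono rest _ (by simp [hr2])

-- invariant of the streaming two-set pass over one char list
theorem pvStepFold (l : List Char) :
    ∀ (s : PySem.Set Char × PySem.Set Char) (cnt : Char → Nat),
    (∀ c, c ∈ s.1 ↔ cnt c = 1) → (∀ c, c ∈ s.2 ↔ 2 ≤ cnt c) →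
    (∀ c, c ∈ (l.foldl pvStepB s).1 ↔ cnt c + l.count c = 1) ∧
    (∀ c, c ∈ (l.foldl pvStepB s).2 ↔ 2 ≤ cnt c + l.count c) := by
  induction l with
  | nil => intro s cnt h1 h2; simpa using ⟨h1, h2⟩
  | cons hd t ih =>
    intro s cnt h1 h2
    have key : ∀ c, (c ∈ (pvStepB s hd).1 ↔ (if c = hd then cnt c + 1 else cnt c) = 1) ∧
        (c ∈ (pvStepB s hd).2 ↔ 2 ≤ (if c = hd then cnt c + 1 else cnt c)) := by
      intro c
      unfold pvStepB
      by_cases hm : hd ∈ s.2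
      · have hhd2 : 2 ≤ cnt hd := (h2 hd).1 hm
        rw [if_pos (by simpa [PySem.Set.contains_iff] using hm)]
        refine ⟨?_, ?_⟩
        · rw [h1 c]
          rcases eq_or_ne c hd with rfl | hc
          · rw [if_pos rfl]; omega
          · rw [if_neg hc]
        · rw [h2 c]
          rcases eq_or_ne c hd with rfl | hc
          · rw [if_pos rfl]; omega
          · rw [if_neg hc]
      · rw [if_neg (by simpa [PySem.Set.contains_iff] using hm)]
        have hhd2 : ¬ 2 ≤ cnt hd := fun h => hm ((h2 hd).2 h)
        by_cases ho : hd ∈ s.1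
        · have hhd1 : cnt hd = 1 := (h1 hd).1 ho
          rw [if_pos (by simpa [PySem.Set.contains_iff] using ho)]
          refine ⟨?_, ?_⟩
          · rw [PySem.Set.mem_discard, h1 c]
            rcases eq_or_ne c hd with rfl | hc
            · rw [if_pos rfl]
              constructor
              · rintro ⟨_, h⟩; exact absurd rfl h
              · intro h; omega
            · rw [if_neg hc]; simp [hc]
          · rw [PySem.Set.mem_add, h2 c]
            rcases eq_or_ne c hd with rfl | hc
            · rw [if_pos rfl]; simp [hhd1]
            · rw [if_neg hc]; simp [hc]
        · have hne1 : cnt hd ≠ 1 := fun h => ho ((h1 hd).2 h)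
          have hhd0 : cnt hd = 0 := by omega
          rw [if_neg (by simpa [PySem.Set.contains_iff] using ho)]
          refine ⟨?_, ?_⟩
          · rw [PySem.Set.mem_add, h1 c]
            rcases eq_or_ne c hd with rfl | hc
            · rw [if_pos rfl]; simp [hhd0]
            · rw [if_neg hc]; simp [hc]
          · rw [h2 c]
            rcases eq_or_ne c hd with rfl | hc
            · rw [if_pos rfl]; omega
            · rw [if_neg hc]
    have hmain := ih (pvStepB s hd) (fun c => if c = hd then cnt c + 1 else cnt c)
      (fun c => (key c).1) (fun c => (key c).2)
    refine ⟨fun c => ?_, fun c => ?_⟩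
    · rw [List.foldl_cons, (hmain.1 c)]
      simp only []
      rcases eq_or_ne c hd with rfl | hc
      · rw [if_pos rfl]; simp [List.count_cons]; omega
      · rw [if_neg hc]; simp [List.count_cons, Ne.symm hc]
    · rw [List.foldl_cons, (hmain.2 c)]
      simp only []
      rcases eq_or_ne c hd with rfl | hc
      · rw [if_pos rfl]; simp [List.count_cons]; omega
      · rw [if_neg hc]; simp [List.count_cons, Ne.symm hc]

theorem pvSetsFold (line : List String) (s0 : PySem.Set Char × PySem.Set Char) :
    line.foldl (fun s cell => if PySem.Str.len cell > 1 then cell.toList.foldl pvStepB s else s) s0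
      = ((line.filter (fun cell => 1 < cell.length)).flatMap String.toList).foldl pvStepB s0 := by
  induction line generalizing s0 with
  | nil => simp
  | cons hd t ih =>
    have hiff : (PySem.Str.len hd > 1) ↔ (1 < hd.length) := by simp [PySem.Str.len_eq]
    by_cases h : 1 < hd.length
    · simp only [List.foldl_cons]
      rw [if_pos (hiff.2 h), ih]
      simp [h, List.foldl_append]
    · simp only [List.foldl_cons]
      rw [if_neg (fun hh => h (hiff.1 hh)), ih]
      simp [h]

theorem pvSeenOnce (line : List String) (c : Char) :
    c ∈ (line.foldl (fun s cell => if PySem.Str.len cell > 1 then cell.toList.foldl pvStepB s else s)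
          ((PySem.Set.empty : PySem.Set Char), (PySem.Set.empty : PySem.Set Char))).1
      ↔ pvOcc line c = 1 := by
  rw [pvSetsFold]
  have h := pvStepFold ((line.filter (fun cell => 1 < cell.length)).flatMap String.toList)
    ((PySem.Set.empty : PySem.Set Char), (PySem.Set.empty : PySem.Set Char))
    (fun _ => 0) (by simp [PySem.Set.empty]) (by simp [PySem.Set.empty])
  rw [h.1 c]
  simp [pvOcc]

theorem pvIdxsNe (seen_once : PySem.Set Char) (cell : String) :
    (!(cell.toList.filterMap (fun c =>
        if PySem.Set.contains seen_once c && pvAlphaB.contains c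
        then PySem.List.index? pvAlphaB c else none)).isEmpty) = true
      ↔ ∃ c ∈ cell.toList, c ∈ seen_once ∧ c ∈ pvAlphaB := by
  rw [Bool.not_eq_eq_eq_not, Bool.not_true, List.isEmpty_eq_false_iff, Ne, List.filterMap_eq_nil_iff]
  push_neg
  constructor
  · rintro ⟨c, hc, hne⟩
    refine ⟨c, hc, ?_⟩
    by_cases hcond : (PySem.Set.contains seen_once c && pvAlphaB.contains c) = true
    · simp only [Bool.and_eq_true, PySem.Set.contains_iff, List.contains_iff_mem] at hcond
      exact ⟨hcond.1, by simpa using hcond.2⟩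
    · rw [if_neg hcond] at hne
      exact absurd rfl hne
  · rintro ⟨c, hc, h1, h2⟩
    refine ⟨c, hc, ?_⟩
    have hcond : (PySem.Set.contains seen_once c && pvAlphaB.contains c) = true := by
      simp [PySem.Set.contains_iff, h1, List.contains_iff_mem, h2]
    rw [if_pos hcond]
    simp [PySem.List.index?_eq_idxOf?, List.idxOf?_eq_none_iff, h2]

theorem pvBFold (seen_once : PySem.Set Char) (l : List String) :
    ∀ (st : List String × Bool),
    (l.foldl (fun (st : List String × Bool) cell =>
      if PySem.Str.len cell > 1 then
        let idxs : List Nat := cell.toList.filterMap (fun c =>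
          if PySem.Set.contains seen_once c && pvAlphaB.contains c
          then PySem.List.index? pvAlphaB c else none)
        match PySem.List.min? idxs (fun x => x) with
        | some m =>
          (st.1 ++ [match PySem.List.pyGet? pvAlphaB (m : Int) with
                    | some c => String.ofList [c]
                    | none => cell], true)
        | none => (st.1 ++ [cell], st.2)
      else (st.1 ++ [cell], st.2)) st).2
      = (st.2 || l.any (fun cell => decide (1 < cell.length) &&
          decide (∃ c ∈ cell.toList, c ∈ seen_once ∧ c ∈ pvAlphaB))) := by
  induction l with
  | nil => intro st; simp
  | cons hd t ih =>
    intro st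
    have hiff : (PySem.Str.len hd > 1) ↔ (1 < hd.length) := by simp [PySem.Str.len_eq]
    by_cases h : 1 < hd.length
    · simp only [List.foldl_cons]
      rw [if_pos (hiff.2 h)]
      cases hp : PySem.List.min? (hd.toList.filterMap (fun c =>
          if PySem.Set.contains seen_once c && pvAlphaB.contains c
          then PySem.List.index? pvAlphaB c else none)) (fun x => x) with
      | some m =>
        have hne : (hd.toList.filterMap (fun c =>
            if PySem.Set.contains seen_once c && pvAlphaB.contains c
            then PySem.List.index? pvAlphaB c else none)) ≠ [] := by
          intro hnil
          rw [hnil] at hp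
          exact absurd hp (by simp [PySem.List.min?])
        have hex : ∃ c ∈ hd.toList, c ∈ seen_once ∧ c ∈ pvAlphaB :=
          (pvIdxsNe seen_once hd).1
            (by rw [Bool.not_eq_eq_eq_not, Bool.not_true, List.isEmpty_eq_false_iff]; exact hne)
        simp only [hp]
        rw [ih]
        simp [h, hex]
      | none =>
        have hnil : (hd.toList.filterMap (fun c =>
            if PySem.Set.contains seen_once c && pvAlphaB.contains c
            then PySem.List.index? pvAlphaB c else none)) = [] := by
          cases hL : (hd.toList.filterMap (fun c =>
              if PySem.Set.contains seen_once c && pvAlphaB.contains c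
              then PySem.List.index? pvAlphaB c else none)) with
          | nil => rfl
          | cons a as =>
            rw [hL, PySem.List.min?_id_cons] at hp
            cases hp
        have hnex : ¬ ∃ c ∈ hd.toList, c ∈ seen_once ∧ c ∈ pvAlphaB := by
          intro hex
          have hb := (pvIdxsNe seen_once hd).2 hex
          rw [Bool.not_eq_eq_eq_not, Bool.not_true, List.isEmpty_eq_false_iff] at hb
          exact hb hnil
        simp only [hp]
        rw [ih]
        simp [h, hnex]
    · simp only [List.foldl_cons]
      rw [if_neg (fun hh => h (hiff.1 hh)), ih]
      simp [h]

theorem pvBCharacter (context : String) (line_index : Int) (line : List String) :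
    resolve_singulars_alt context line_index line = true ↔ ∃ c ∈ pvAlphaB, pvOcc line c = 1 := by
  simp only [resolve_singulars_alt]
  rw [pvBFold]
  simp only [Bool.false_or, List.any_eq_true, Bool.and_eq_true, decide_eq_true_eq]
  constructor
  · rintro ⟨cell, hcl, hlen, c, hcc, hcs, hcal⟩
    exact ⟨c, hcal, (pvSeenOnce line c).1 hcs⟩
  · rintro ⟨c, hcal, hocc⟩
    obtain ⟨cell, hcl, hlen, hmemc⟩ := pvOccMem line c hocc
    exact ⟨cell, hcl, hlen, c, hmemc, (pvSeenOnce line c).2 hocc, hcal⟩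

-- ===== VERDICT (by name: the statement is the Claim_ definition above) =====
theorem resolve_singulars_spec : Claim_equal_resolve_singulars := by
  intro context line_index line _
  unfold Spec_resolve_singulars
  rw [Bool.eq_iff_iff]
  exact (pvACharacter context line_index line).trans (pvBCharacter context line_index line).symm
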